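-- pv_equiv track=rewrite | github.com/981377660LMT/algorithm-study | 22_专题/区间问题/区间操作/删除重叠区间.py | eraseOuterInterval
-- ===== SOURCE A (Python) =====
-- from typing import List, Tuple
--
-- def eraseOuterInterval(intervals: List[Tuple[int, int]]) -> List[Tuple[int, int]]:
--     intervals = sorted(intervals, key=lambda x: (-x[1], x[0]))
--     res = []
--     for interval in intervals:
--         while res:
--             back = res[-1]
--             if interval[0] < back[0]:
--                 break
--             res.pop()
--         res.append(interval)
--     res.reverse()
--     return res
-- ===== SOURCE B (Python) =====
-- from typing import List, Tuple
--
-- def eraseOuterInterval(intervals: List[Tuple[int, int]]) -> List[Tuple[int, int]]: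
--     res = []
--     seen = set()
--     for x in intervals:
--         if x in seen:
--             continue
--         if any(y != x and x[0] <= y[0] and y[1] <= x[1] for y in intervals):
--             continue
--         seen.add(x)
--         res.append(x)
--     res.sort(key=lambda p: p[0])
--     return res
-- ===== Notes on version B (the rewrite author's own statement) =====
-- stated objective: simpler
-- what changed: Replaced the sort-by-(-end,start) + monotonic-stack pass with a direct nested-scan filter: keep each interval that does not contain a distinct interval, dedup survivors with a seen-set, and sort them by start.
import Mathlib
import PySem

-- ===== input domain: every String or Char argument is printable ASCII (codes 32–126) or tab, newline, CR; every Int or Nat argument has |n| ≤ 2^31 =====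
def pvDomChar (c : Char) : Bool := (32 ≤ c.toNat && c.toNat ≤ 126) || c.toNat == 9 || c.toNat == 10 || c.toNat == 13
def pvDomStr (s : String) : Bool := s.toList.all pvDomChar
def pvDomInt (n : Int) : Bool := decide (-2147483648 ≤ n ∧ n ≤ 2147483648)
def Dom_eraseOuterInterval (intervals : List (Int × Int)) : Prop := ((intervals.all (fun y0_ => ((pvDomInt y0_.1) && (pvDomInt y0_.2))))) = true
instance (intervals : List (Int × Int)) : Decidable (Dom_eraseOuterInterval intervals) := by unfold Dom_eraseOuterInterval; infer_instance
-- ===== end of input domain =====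

-- B replaces A's sort + monotonic-stack pass by a direct nested-scan containment filter (simpler, not faster).

-- ===== PORT A =====
-- Python's `res` is kept head-first here (head = res[-1], the stack top), so the final
-- Python `res.reverse()` makes the returned list exactly the stored stack.
def popLoop (interval : Int × Int) : List (Int × Int) → List (Int × Int)
  | [] => []
  | back :: rest => if interval.1 < back.1 then back :: rest else popLoop interval rest

def eraseOuterInterval (intervals : List (Int × Int)) : List (Int × Int) :=
  let sortedIntervals := PySem.List.sorted2 intervals (fun x => -x.2) (fun x => x.1)
  sortedIntervals.foldl (fun res interval => interval :: popLoop interval res) []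

-- ===== PORT B =====
def eraseOuterInterval_alt (intervals : List (Int × Int)) : List (Int × Int) :=
  let st := intervals.foldl (fun (st : PySem.Set (Int × Int) × List (Int × Int)) x =>
      if PySem.Set.contains st.1 x then st
      else if intervals.any (fun y => decide (y ≠ x) && decide (x.1 ≤ y.1) && decide (y.2 ≤ x.2)) then st
      else (PySem.Set.add st.1 x, st.2 ++ [x]))
    (PySem.Set.empty, ([] : List (Int × Int)))
  PySem.List.sorted st.2 (fun p => p.1)

-- ===== PRECONDITION & SPEC =====
def Spec_eraseOuterInterval (intervals : List (Int × Int)) (out : List (Int × Int)) : Prop := out = eraseOuterInterval_alt intervals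
instance (intervals : List (Int × Int)) (out : List (Int × Int)) : Decidable (Spec_eraseOuterInterval intervals out) := by unfold Spec_eraseOuterInterval; infer_instance

-- ===== CLAIM (what is proved, stated in full; the proofs are below) =====
def Claim_equal_eraseOuterInterval : Prop := ∀ (intervals : List (Int × Int)), Dom_eraseOuterInterval intervals → Spec_eraseOuterInterval intervals (eraseOuterInterval intervals)

-- ===== LEMMAS AND PROOFS =====

-- x "survives": it is in l and does not contain any distinct member of l
def Surv (l : List (Int × Int)) (x : Int × Int) : Prop :=
  x ∈ l ∧ ∀ y ∈ l, y ≠ x → ¬(x.1 ≤ y.1 ∧ y.2 ≤ x.2)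

-- the (non-strict) lexicographic order of A's sort key (-end, start)
def LexLE (a b : Int × Int) : Prop := b.2 < a.2 ∨ (b.2 = a.2 ∧ a.1 ≤ b.1)

theorem lexLE_trans {a b c : Int × Int} (h1 : LexLE a b) (h2 : LexLE b c) : LexLE a c := by
  unfold LexLE at *; omega

theorem insertBy_pairwise_lexLE (x : Int × Int) (acc : List (Int × Int))
    (h : acc.Pairwise LexLE) :
    (PySem.List.insertBy (fun a b => decide (-a.2 < -b.2) || (!decide (-b.2 < -a.2) && decide (a.1 < b.1))) x acc).Pairwise LexLE := by
  induction acc with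
  | nil => simp [PySem.List.insertBy]
  | cons y ys ih =>
    rw [List.pairwise_cons] at h
    simp only [PySem.List.insertBy]
    split
    · rename_i hb
      simp only [Bool.or_eq_true, Bool.and_eq_true, decide_eq_true_eq, Bool.not_eq_true',
        decide_eq_false_iff_not] at hb
      have hxy : LexLE x y := by unfold LexLE; omega
      refine List.pairwise_cons.2 ⟨?_, List.pairwise_cons.2 ⟨h.1, h.2⟩⟩
      intro z hz
      rcases List.mem_cons.1 hz with rfl | hz
      · exact hxy
      · exact lexLE_trans hxy (h.1 z hz)
    · rename_i hb
      simp only [Bool.or_eq_true, Bool.and_eq_true, decide_eq_true_eq, Bool.not_eq_true',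
        decide_eq_false_iff_not, not_or, not_and, not_lt] at hb
      have hyx : LexLE y x := by unfold LexLE; omega
      refine List.pairwise_cons.2 ⟨?_, ih h.2⟩
      intro z hz
      rcases (PySem.List.mem_insertBy _ _ _ _).1 hz with rfl | hz
      · exact hyx
      · exact h.1 z hz

theorem pairwise_sorted2A (xs : List (Int × Int)) :
    (PySem.List.sorted2 xs (fun x => -x.2) (fun x => x.1)).Pairwise LexLE := by
  have main : ∀ (l acc : List (Int × Int)), acc.Pairwise LexLE →
      (l.foldl (fun acc x => PySem.List.insertBy (fun a b => decide (-a.2 < -b.2) || (!decide (-b.2 < -a.2) && decide (a.1 < b.1))) x acc) acc).Pairwise LexLE := by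
    intro l
    induction l with
    | nil => intro acc h; simpa using h
    | cons x t ih =>
      intro acc h
      exact ih _ (insertBy_pairwise_lexLE x acc h)
  simpa [PySem.List.sorted2] using main xs [] (by simp)

theorem mem_of_mem_popLoop {i x : Int × Int} {s : List (Int × Int)}
    (h : x ∈ popLoop i s) : x ∈ s := by
  induction s with
  | nil => simp [popLoop] at h
  | cons b t ih =>
    simp only [popLoop] at h
    split at h
    · exact h
    · exact List.mem_cons_of_mem _ (ih h)

theorem popLoop_gt {i : Int × Int} {s : List (Int × Int)}
    (hs : s.Pairwise (fun a b => a.1 < b.1)) :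
    ∀ z ∈ popLoop i s, i.1 < z.1 := by
  induction s with
  | nil => simp [popLoop]
  | cons b t ih =>
    rw [List.pairwise_cons] at hs
    intro z hz
    simp only [popLoop] at hz
    split at hz
    · rename_i hb
      rcases List.mem_cons.1 hz with rfl | hz
      · exact hb
      · exact lt_trans hb (hs.1 z hz)
    · exact ih hs.2 z hz

theorem popLoop_pairwise {i : Int × Int} {s : List (Int × Int)}
    (hs : s.Pairwise (fun a b => a.1 < b.1)) :
    (popLoop i s).Pairwise (fun a b => a.1 < b.1) := by
  induction s with
  | nil => simpa [popLoop] using hs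
  | cons b t ih =>
    rw [List.pairwise_cons] at hs
    simp only [popLoop]
    split
    · exact List.pairwise_cons.2 ⟨hs.1, hs.2⟩
    · exact ih hs.2

theorem mem_popLoop {i x : Int × Int} {s : List (Int × Int)}
    (hs : s.Pairwise (fun a b => a.1 < b.1)) :
    x ∈ popLoop i s ↔ x ∈ s ∧ i.1 < x.1 := by
  constructor
  · intro h; exact ⟨mem_of_mem_popLoop h, popLoop_gt hs x h⟩
  · rintro ⟨hmem, hlt⟩
    induction s with
    | nil => simp at hmem
    | cons b t ih =>
      rw [List.pairwise_cons] at hs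
      simp only [popLoop]
      split
      · exact hmem
      · rename_i hb
        rcases List.mem_cons.1 hmem with rfl | hm
        · exact absurd hlt hb
        · exact ih hs.2 hm

theorem run_main : ∀ (rest P s : List (Int × Int)),
    (P ++ rest).Pairwise LexLE →
    s.Pairwise (fun a b => a.1 < b.1) →
    (∀ x, x ∈ s ↔ Surv P x) →
    (rest.foldl (fun res interval => interval :: popLoop interval res) s).Pairwise (fun a b => a.1 < b.1) ∧
      (∀ x, x ∈ rest.foldl (fun res interval => interval :: popLoop interval res) s ↔ Surv (P ++ rest) x) := by
  intro rest
  induction rest with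
  | nil =>
    intro P s _ hs hmem
    exact ⟨hs, by simpa using hmem⟩
  | cons i rest ih =>
    intro P s hsort hs hmem
    have hPi : ∀ p ∈ P, LexLE p i := by
      intro p hp
      exact (List.pairwise_append.1 hsort).2.2 p hp i (List.mem_cons_self)
    have hs' : (i :: popLoop i s).Pairwise (fun a b => a.1 < b.1) :=
      List.pairwise_cons.2 ⟨popLoop_gt hs, popLoop_pairwise hs⟩
    have hmem' : ∀ x, x ∈ i :: popLoop i s ↔ Surv (P ++ [i]) x := by
      intro x
      constructor
      · intro hx
        rcases List.mem_cons.1 hx with rfl | hx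
        · refine ⟨by simp, ?_⟩
          intro y hy hne hcon
          obtain ⟨h1, h2⟩ := hcon
          rcases List.mem_append.1 hy with hyP | hyi
          · have hli := hPi y hyP
            unfold LexLE at hli
            exact hne (Prod.ext_iff.2 ⟨by omega, by omega⟩)
          · exact hne (by simpa using hyi)
        · have hxs := (hmem x).1 (mem_of_mem_popLoop hx)
          have hgt := popLoop_gt hs x hx
          refine ⟨List.mem_append_left _ hxs.1, ?_⟩
          intro y hy hne hcon
          rcases List.mem_append.1 hy with hyP | hyi
          · exact hxs.2 y hyP hne hcon
          · have : y = i := by simpa using hyi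
            subst this
            omega
      · rintro ⟨hxm, hnw⟩
        by_cases hxi : x = i
        · subst hxi; exact List.mem_cons_self
        · have hxP : x ∈ P := by
            rcases List.mem_append.1 hxm with h | h
            · exact h
            · exact absurd (by simpa using h) hxi
          have hxs : x ∈ s := (hmem x).2 ⟨hxP, fun y hy => hnw y (List.mem_append_left _ hy)⟩
          have hni : ¬(x.1 ≤ i.1 ∧ i.2 ≤ x.2) :=
            hnw i (List.mem_append_right _ (by simp)) (fun h => hxi h.symm)
          have hlt : i.1 < x.1 := by
            have hli := hPi x hxP
            unfold LexLE at hli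
            omega
          exact List.mem_cons_of_mem _ ((mem_popLoop hs).2 ⟨hxs, hlt⟩)
    have hsort' : ((P ++ [i]) ++ rest).Pairwise LexLE := by
      simpa [List.append_assoc] using hsort
    have := ih (P ++ [i]) (i :: popLoop i s) hsort' hs' hmem'
    simpa [List.append_assoc, List.singleton_append, List.foldl_cons] using this

-- predicate used for B's loop: x contains no distinct member of intervals
def NoWit (intervals : List (Int × Int)) (x : Int × Int) : Prop :=
  ∀ y ∈ intervals, y ≠ x → ¬(x.1 ≤ y.1 ∧ y.2 ≤ x.2)

theorem alt_fold (intervals : List (Int × Int)) :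
    ∀ (suf pre : List (Int × Int)) (st : PySem.Set (Int × Int) × List (Int × Int)),
    st.1 = st.2 → st.2.Nodup → (∀ x, x ∈ st.2 ↔ x ∈ pre ∧ NoWit intervals x) →
    (let r := suf.foldl (fun (st : PySem.Set (Int × Int) × List (Int × Int)) x =>
      if PySem.Set.contains st.1 x then st
      else if intervals.any (fun y => decide (y ≠ x) && decide (x.1 ≤ y.1) && decide (y.2 ≤ x.2)) then st
      else (PySem.Set.add st.1 x, st.2 ++ [x])) st
    r.1 = r.2 ∧ r.2.Nodup ∧ (∀ x, x ∈ r.2 ↔ x ∈ pre ++ suf ∧ NoWit intervals x)) := by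
  intro suf
  induction suf with
  | nil =>
    intro pre st h1 h2 h3
    exact ⟨h1, h2, by simpa using h3⟩
  | cons x t ih =>
    intro pre st h1 h2 h3
    simp only [List.foldl_cons]
    have key : ∀ st', st' = (if PySem.Set.contains st.1 x then st
        else if intervals.any (fun y => decide (y ≠ x) && decide (x.1 ≤ y.1) && decide (y.2 ≤ x.2)) then st
        else (PySem.Set.add st.1 x, st.2 ++ [x])) →
        st'.1 = st'.2 ∧ st'.2.Nodup ∧ (∀ z, z ∈ st'.2 ↔ z ∈ pre ++ [x] ∧ NoWit intervals z) := by
      intro st' hst'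
      by_cases hc : PySem.Set.contains st.1 x = true
      · rw [hst', if_pos hc]
        have hxs : x ∈ st.2 := h1 ▸ (PySem.Set.contains_iff _ _).1 hc
        have hxp := (h3 x).1 hxs
        refine ⟨h1, h2, ?_⟩
        intro z
        rw [h3 z]
        constructor
        · rintro ⟨hz, hnw⟩; exact ⟨List.mem_append_left _ hz, hnw⟩
        · rintro ⟨hz, hnw⟩
          rcases List.mem_append.1 hz with hz | hz
          · exact ⟨hz, hnw⟩
          · have : z = x := by simpa using hz
            subst this; exact hxp
      · by_cases ha : intervals.any (fun y => decide (y ≠ x) && decide (x.1 ≤ y.1) && decide (y.2 ≤ x.2)) = true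
        · rw [hst', if_neg hc, if_pos ha]
          have hnwx : ¬ NoWit intervals x := by
            simp only [List.any_eq_true, Bool.and_eq_true, decide_eq_true_eq] at ha
            obtain ⟨y, hy, h'⟩ := ha
            intro hnw; exact hnw y hy h'.1.1 ⟨h'.1.2, h'.2⟩
          refine ⟨h1, h2, ?_⟩
          intro z
          rw [h3 z]
          constructor
          · rintro ⟨hz, hnw⟩; exact ⟨List.mem_append_left _ hz, hnw⟩
          · rintro ⟨hz, hnw⟩
            rcases List.mem_append.1 hz with hz | hz
            · exact ⟨hz, hnw⟩
            · have : z = x := by simpa using hz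
              subst this; exact absurd hnw hnwx
        · rw [hst', if_neg hc, if_neg ha]
          have hxns : x ∉ st.2 := fun hm => hc ((PySem.Set.contains_iff _ _).2 (h1 ▸ hm))
          have hnwx : NoWit intervals x := by
            intro y hy hne hcon
            apply ha
            simp only [List.any_eq_true, Bool.and_eq_true, decide_eq_true_eq]
            exact ⟨y, hy, ⟨hne, hcon.1⟩, hcon.2⟩
          refine ⟨?_, ?_, ?_⟩
          · show PySem.Set.add st.1 x = st.2 ++ [x]
            rw [PySem.Set.add_of_not_mem (h1 ▸ hxns), h1]
          · refine List.Nodup.append h2 (List.nodup_singleton x) ?_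
            simpa [List.disjoint_singleton] using hxns
          · intro z
            simp only [List.mem_append, List.mem_singleton, h3 z]
            constructor
            · rintro (⟨hz, hnw⟩ | rfl)
              · exact ⟨Or.inl hz, hnw⟩
              · exact ⟨Or.inr rfl, hnwx⟩
            · rintro ⟨hz | hz, hnw⟩
              · exact Or.inl ⟨hz, hnw⟩
              · exact Or.inr hz
    obtain ⟨k1, k2, k3⟩ := key _ rfl
    have := ih (pre ++ [x]) _ k1 k2 k3
    simpa [List.append_assoc] using this

-- two distinct survivors have distinct starts
theorem surv_fst_ne {l : List (Int × Int)} {a b : Int × Int}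
    (ha : Surv l a) (hb : Surv l b) (hne : a ≠ b) : a.1 ≠ b.1 := by
  intro heq
  by_cases h2 : a.2 ≤ b.2
  · exact hb.2 a ha.1 hne ⟨by omega, h2⟩
  · exact ha.2 b hb.1 (Ne.symm hne) ⟨by omega, by omega⟩

theorem memA_iff (intervals : List (Int × Int)) :
    ((eraseOuterInterval intervals).Pairwise (fun a b => a.1 < b.1)) ∧
    (∀ x, x ∈ eraseOuterInterval intervals ↔ Surv intervals x) := by
  have hperm := PySem.List.sorted2_perm intervals (fun x => -x.2) (fun x => x.1) false
  have hrun := run_main (PySem.List.sorted2 intervals (fun x => -x.2) (fun x => x.1)) [] []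
    (by simpa using pairwise_sorted2A intervals) (by simp) (by simp [Surv])
  have hA : eraseOuterInterval intervals =
      (PySem.List.sorted2 intervals (fun x => -x.2) (fun x => x.1)).foldl
        (fun res interval => interval :: popLoop interval res) [] := rfl
  rw [hA]
  refine ⟨hrun.1, ?_⟩
  intro x
  rw [hrun.2 x]
  unfold Surv
  constructor
  · rintro ⟨hm, hw⟩
    exact ⟨hperm.mem_iff.1 (by simpa using hm), fun y hy => hw y (by simpa using hperm.mem_iff.2 hy)⟩
  · rintro ⟨hm, hw⟩
    exact ⟨by simpa using hperm.mem_iff.2 hm, fun y hy => hw y (hperm.mem_iff.1 (by simpa using hy))⟩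

theorem memB_iff (intervals : List (Int × Int)) :
    ((eraseOuterInterval_alt intervals).Pairwise (fun a b => a.1 < b.1)) ∧
    (∀ x, x ∈ eraseOuterInterval_alt intervals ↔ Surv intervals x) := by
  have hfold := alt_fold intervals intervals [] (PySem.Set.empty, ([] : List (Int × Int)))
    rfl (by simp) (by simp)
  obtain ⟨k1, k2, k3⟩ := hfold
  have hB : eraseOuterInterval_alt intervals = PySem.List.sorted
      ((intervals.foldl (fun (st : PySem.Set (Int × Int) × List (Int × Int)) x =>
        if PySem.Set.contains st.1 x then st
        else if intervals.any (fun y => decide (y ≠ x) && decide (x.1 ≤ y.1) && decide (y.2 ≤ x.2)) then st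
        else (PySem.Set.add st.1 x, st.2 ++ [x])) (PySem.Set.empty, ([] : List (Int × Int)))).2)
      (fun p => p.1) := rfl
  have hmem : ∀ x, x ∈ eraseOuterInterval_alt intervals ↔ Surv intervals x := by
    intro x
    rw [hB, PySem.List.mem_sorted, k3 x]
    simp [Surv, NoWit]
  refine ⟨?_, hmem⟩
  have hle := PySem.List.sorted_pairwise
    ((intervals.foldl (fun (st : PySem.Set (Int × Int) × List (Int × Int)) x =>
      if PySem.Set.contains st.1 x then st
      else if intervals.any (fun y => decide (y ≠ x) && decide (x.1 ≤ y.1) && decide (y.2 ≤ x.2)) then st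
      else (PySem.Set.add st.1 x, st.2 ++ [x])) (PySem.Set.empty, ([] : List (Int × Int)))).2)
    (fun p => p.1)
  have hnd : (eraseOuterInterval_alt intervals).Nodup := by
    rw [hB]
    exact (PySem.List.sorted_perm _ _ _).nodup_iff.2 k2
  rw [hB] at hnd ⊢
  have hand := List.Pairwise.and hle hnd
  refine List.Pairwise.imp_of_mem ?_ hand
  intro a b hma hmb hab'
  obtain ⟨hab, hneq⟩ := hab'
  have hsa : Surv intervals a := (hmem a).1 (by rw [hB]; exact hma)
  have hsb : Surv intervals b := (hmem b).1 (by rw [hB]; exact hmb)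
  have := surv_fst_ne hsa hsb hneq
  omega

-- ===== VERDICT (by name: the statement is the Claim_ definition above) =====
theorem eraseOuterInterval_spec : Claim_equal_eraseOuterInterval := by
  intro intervals _
  unfold Spec_eraseOuterInterval
  obtain ⟨hpA, hmA⟩ := memA_iff intervals
  obtain ⟨hpB, hmB⟩ := memB_iff intervals
  have hndA : (eraseOuterInterval intervals).Nodup :=
    List.Pairwise.imp (fun h he => by subst he; exact lt_irrefl _ h) hpA
  have hndB : (eraseOuterInterval_alt intervals).Nodup :=
    List.Pairwise.imp (fun h he => by subst he; exact lt_irrefl _ h) hpB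
  have hperm : (eraseOuterInterval intervals).Perm (eraseOuterInterval_alt intervals) :=
    (List.perm_ext_iff_of_nodup hndA hndB).2 (fun a => (hmA a).trans (hmB a).symm)
  exact List.Perm.eq_of_pairwise (fun a b _ _ h h' => by omega) hpA hpB hperm
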